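-- pv_equiv track=rewrite | github.com/ThunderKhan/LeetCode-Solutions | Python/2357MakeArrayZeroBySubtractingEqualAmounts.py | minimumOperations
-- ===== SOURCE A (Python) =====
-- def minimumOperations(nums : list[int]) -> int:
--     seen = set()
--     nonZeroCount = 0
--
--     for i in range(len(nums)):
--         if (nums[i] != 0) and (nums[i] not in seen):
--             nonZeroCount += 1
--             seen.add(nums[i])
--
--     return nonZeroCount
-- ===== SOURCE B (Python) =====
-- def minimumOperations(nums: list[int]) -> int:
--     count = 0
--     prev = None
--     for x in sorted(nums):
--         if x != 0 and x != prev: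
--             count += 1
--         prev = x
--     return count
-- ===== Notes on version B (the rewrite author's own statement) =====
-- stated objective: alternative
-- what changed: Replaces the set-membership scan with a sort followed by a single adjacent-comparison pass that counts nonzero values differing from the previous element.
import Mathlib
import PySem

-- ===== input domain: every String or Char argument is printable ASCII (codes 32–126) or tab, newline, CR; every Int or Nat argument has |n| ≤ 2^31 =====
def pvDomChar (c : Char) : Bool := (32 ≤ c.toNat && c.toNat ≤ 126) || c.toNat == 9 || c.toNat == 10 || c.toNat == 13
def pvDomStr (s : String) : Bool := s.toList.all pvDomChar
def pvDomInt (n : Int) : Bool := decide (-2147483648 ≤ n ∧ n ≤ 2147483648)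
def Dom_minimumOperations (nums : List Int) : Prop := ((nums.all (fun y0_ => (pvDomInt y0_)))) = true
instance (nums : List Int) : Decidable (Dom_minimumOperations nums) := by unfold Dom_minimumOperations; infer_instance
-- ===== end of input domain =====

-- B replaces A's set-membership scan by sort-then-adjacent-comparison (alternative algorithm, same result).

-- ===== PORT A =====
-- seen = set(); count = 0; for i in range(len(nums)): if nums[i] != 0 and nums[i] not in seen: count += 1; seen.add(nums[i])
def minimumOperations (nums : List Int) : Int :=
  let st := (PySem.List.pyRange 0 nums.length 1).foldl
    (fun (st : PySem.Set Int × Int) i =>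
      let x := PySem.List.pyGetD nums i 0
      if decide (x ≠ 0) && !(PySem.Set.contains st.1 x) then (PySem.Set.add st.1 x, st.2 + 1) else st)
    (PySem.Set.empty, 0)
  st.2

-- ===== PORT B =====
-- count = 0; prev = None; for x in sorted(nums): if x != 0 and x != prev: count += 1; prev = x
def minimumOperations_alt (nums : List Int) : Int :=
  (((PySem.List.sorted nums (fun x => x) false).foldl
    (fun (st : Int × Option Int) x =>
      (if decide (x ≠ 0) && decide (some x ≠ st.2) then st.1 + 1 else st.1, some x))
    ((0 : Int), (none : Option Int)))).1

-- ===== PRECONDITION & SPEC =====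
def Spec_minimumOperations (nums : List Int) (out : Int) : Prop := out = minimumOperations_alt nums
instance (nums : List Int) (out : Int) : Decidable (Spec_minimumOperations nums out) := by unfold Spec_minimumOperations; infer_instance

-- ===== CLAIM (what is proved, stated in full; the proofs are below) =====
def Claim_equal_minimumOperations : Prop := ∀ (nums : List Int), Dom_minimumOperations nums → Spec_minimumOperations nums (minimumOperations nums)

-- ===== LEMMAS AND PROOFS =====

-- A's loop in elementwise form
def stepA (st : PySem.Set Int × Int) (x : Int) : PySem.Set Int × Int :=
  if decide (x ≠ 0) && !(PySem.Set.contains st.1 x) then (PySem.Set.add st.1 x, st.2 + 1) else st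

lemma foldA_spec (l : List Int) : ∀ (s : PySem.Set Int) (c : Int),
    (l.foldl stepA (s, c)).2 = c + ((PySem.Set.update s (l.filter (fun x => decide (x ≠ 0)))).length : Int) - (s.length : Int) := by
  induction l with
  | nil => intro s c; simp [PySem.Set.update_nil]
  | cons x t ih =>
    intro s c
    by_cases hx : x = 0
    · subst hx
      simp only [List.foldl_cons, List.filter_cons, stepA]
      simp [ih]
    · have hfx : (x :: t).filter (fun y => decide (y ≠ 0)) = x :: t.filter (fun y => decide (y ≠ 0)) := by
        simp [hx]
      by_cases hm : x ∈ s
      · have hstep : stepA (s, c) x = (s, c) := by simp [stepA, hm]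
        rw [List.foldl_cons, hstep, hfx, PySem.Set.update_cons, PySem.Set.add_of_mem hm, ih]
      · have hstep : stepA (s, c) x = (PySem.Set.add s x, c + 1) := by simp [stepA, hm, hx]
        rw [List.foldl_cons, hstep, hfx, PySem.Set.update_cons, ih]
        have hlen : (PySem.Set.add s x).length = s.length + 1 := by
          rw [PySem.Set.add_of_not_mem hm]; simp
        rw [hlen]
        push_cast
        ring

-- B's count as a recursion
def cntB : Option Int → List Int → Int
  | _, [] => 0
  | p, x :: t => (if decide (x ≠ 0) && decide (some x ≠ p) then (1:Int) else 0) + cntB (some x) t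

lemma foldB_eq_cntB (l : List Int) : ∀ (c : Int) (p : Option Int),
    (l.foldl (fun (st : Int × Option Int) x =>
      (if decide (x ≠ 0) && decide (some x ≠ st.2) then st.1 + 1 else st.1, some x)) (c, p)).1
    = c + cntB p l := by
  induction l with
  | nil => intro c p; simp [cntB]
  | cons x t ih =>
    intro c p
    simp only [List.foldl_cons, cntB, ih]
    split <;> ring

lemma cntB_sorted (l : List Int) (hl : l.Pairwise (· ≤ ·)) : ∀ (p : Option Int),
    (∀ y ∈ l, ∀ v, p = some v → v ≤ y) →
    cntB p l = (((l.filter (fun x => decide (x ≠ 0) && decide (some x ≠ p))).toFinset.card : Int)) := by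
  induction l with
  | nil => intro p _; simp [cntB]
  | cons x t ih =>
    rw [List.pairwise_cons] at hl
    obtain ⟨hx, ht⟩ := hl
    intro p hp
    have hpx : ∀ v, p = some v → v ≤ x := hp x (by simp)
    have iht := ih ht (some x) (by intro y hy v hv; cases hv; exact hx y hy)
    by_cases hc : x ≠ 0 ∧ some x ≠ p
    · have hcb : (decide (x ≠ 0) && decide (some x ≠ p)) = true := by
        simp [hc.1, hc.2]
      have hfc : (x :: t).filter (fun y => decide (y ≠ 0) && decide (some y ≠ p)) =
          x :: t.filter (fun y => decide (y ≠ 0) && decide (some y ≠ p)) := by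
        rw [List.filter_cons, hcb]; simp
      have hset : insert x ((t.filter (fun y => decide (y ≠ 0) && decide (some y ≠ p))).toFinset)
          = insert x ((t.filter (fun y => decide (y ≠ 0) && decide (some y ≠ some x))).toFinset) := by
        ext y
        simp only [Finset.mem_insert, List.mem_toFinset, List.mem_filter, Bool.and_eq_true,
          decide_eq_true_eq, ne_eq, Option.some.injEq]
        constructor
        · rintro (h | ⟨hyt, hy0, hyp⟩)
          · exact Or.inl h
          · by_cases hyx : y = x
            · exact Or.inl hyx
            · exact Or.inr ⟨hyt, hy0, hyx⟩
        · rintro (h | ⟨hyt, hy0, hyx⟩)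
          · exact Or.inl h
          · refine Or.inr ⟨hyt, hy0, fun hpy => ?_⟩
            have h1 : y ≤ x := hpx y hpy.symm
            have h2 : x ≤ y := hx y hyt
            exact hyx (le_antisymm h1 h2)
      have hxnot : x ∉ (t.filter (fun y => decide (y ≠ 0) && decide (some y ≠ some x))).toFinset := by
        simp
      rw [cntB, hcb, if_pos rfl, iht, hfc]
      rw [List.toFinset_cons, hset, Finset.card_insert_of_notMem hxnot]
      push_cast
      ring
    · have hcb : (decide (x ≠ 0) && decide (some x ≠ p)) = false := by
        by_cases h0 : x = 0
        · simp [h0]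
        · have hpe : some x = p := by
            by_contra h; exact hc ⟨h0, h⟩
          simp [← hpe]
      have hfc : (x :: t).filter (fun y => decide (y ≠ 0) && decide (some y ≠ p)) =
          t.filter (fun y => decide (y ≠ 0) && decide (some y ≠ p)) := by
        rw [List.filter_cons, hcb]; simp
      have hset : (t.filter (fun y => decide (y ≠ 0) && decide (some y ≠ p))).toFinset
          = (t.filter (fun y => decide (y ≠ 0) && decide (some y ≠ some x))).toFinset := by
        ext y
        simp only [List.mem_toFinset, List.mem_filter, Bool.and_eq_true, decide_eq_true_eq, ne_eq,
          Option.some.injEq]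
        constructor
        · rintro ⟨hyt, hy0, hyp⟩
          refine ⟨hyt, hy0, fun hyx => ?_⟩
          subst hyx
          exact hc ⟨hy0, hyp⟩
        · rintro ⟨hyt, hy0, hyx⟩
          refine ⟨hyt, hy0, fun hpy => ?_⟩
          have h1 : y ≤ x := hpx y hpy.symm
          have h2 : x ≤ y := hx y hyt
          exact hyx (le_antisymm h1 h2)
      rw [cntB, hcb, if_neg (by simp), iht, hfc, hset]
      ring

lemma ofList_length_toFinset (xs : List Int) :
    (PySem.Set.ofList xs).length = xs.toFinset.card := by
  have hnd : (PySem.Set.ofList xs).Nodup := PySem.Set.nodup_ofList xs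
  have h1 : (PySem.Set.ofList xs).toFinset.card = (PySem.Set.ofList xs).length :=
    List.toFinset_card_of_nodup hnd
  have h2 : (PySem.Set.ofList xs).toFinset = xs.toFinset := by
    ext y
    simp [List.mem_toFinset, PySem.Set.mem_ofList]
  rw [← h1, h2]

-- ===== VERDICT (by name: the statement is the Claim_ definition above) =====
theorem minimumOperations_spec : Claim_equal_minimumOperations := by
  intro nums _
  unfold Spec_minimumOperations minimumOperations minimumOperations_alt
  have hA : (PySem.List.pyRange 0 (nums.length : Int) 1).foldl
      (fun (st : PySem.Set Int × Int) i =>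
        let x := PySem.List.pyGetD nums i 0
        if decide (x ≠ 0) && !(PySem.Set.contains st.1 x) then (PySem.Set.add st.1 x, st.2 + 1) else st)
      (PySem.Set.empty, 0)
      = nums.foldl stepA (PySem.Set.empty, 0) := by
    exact PySem.List.foldl_pyRange_zero_pyGetD' nums 0 stepA (PySem.Set.empty, 0)
  have hupd : PySem.Set.update PySem.Set.empty (nums.filter (fun x => decide (x ≠ 0)))
      = PySem.Set.ofList (nums.filter (fun x => decide (x ≠ 0))) := rfl
  have hAval : (nums.foldl stepA (PySem.Set.empty, 0)).2
      = (((nums.filter (fun x => decide (x ≠ 0))).toFinset.card : Int)) := by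
    rw [foldA_spec, hupd, ofList_length_toFinset]
    simp [PySem.Set.empty]
  -- B side
  have hperm : (PySem.List.sorted nums (fun x => x) false).Perm nums :=
    PySem.List.sorted_perm nums (fun x => x) false
  have hpw : (PySem.List.sorted nums (fun x => x) false).Pairwise (· ≤ ·) := by
    simpa using PySem.List.sorted_pairwise nums (fun x => x)
  have hB := cntB_sorted (PySem.List.sorted nums (fun x => x) false) hpw none
    (by intro y _ v hv; cases hv)
  have hfilt : (PySem.List.sorted nums (fun x => x) false).filter
        (fun x => decide (x ≠ 0) && decide ((some x : Option Int) ≠ none))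
      = (PySem.List.sorted nums (fun x => x) false).filter (fun x => decide (x ≠ 0)) :=
    List.filter_congr (by intro x _; simp)
  have hpermf : ((PySem.List.sorted nums (fun x => x) false).filter (fun x => decide (x ≠ 0))).Perm
      (nums.filter (fun x => decide (x ≠ 0))) := hperm.filter _
  have htf : ((PySem.List.sorted nums (fun x => x) false).filter (fun x => decide (x ≠ 0))).toFinset
      = (nums.filter (fun x => decide (x ≠ 0))).toFinset := by
    ext y
    simp only [List.mem_toFinset]
    exact hpermf.mem_iff
  rw [hA, hAval, foldB_eq_cntB, hB, hfilt, htf]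
  ring
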